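-- pv_equiv track=rewrite | github.com/YU-Zhejian/art_modern | src/py/art-profile-fastqc.py | make_linear_base_groups
-- ===== SOURCE A (Python) =====
-- from typing import Tuple, List
--
-- def get_linear_interval(length: int) -> int:
--     """
--     Returns a sensible interval grouping for a given length.
--     The first 9 positions are treated individually, then finds a grouping value
--     which gives a total set of groups below 75.
--     """
--     base_values = [2, 5, 10]
--     multiplier = 1
--
--     while True:
--         for base in base_values:
--             interval = base * multiplier
--             group_count = 9 + ((length - 9) // interval)
--             if (length - 9) % interval != 0:
--                 group_count += 1
--             if group_count < 75:
--                 return interval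
--         multiplier *= 10
--         if multiplier == 10000000:
--             raise Exception(f"Couldn't find a sensible interval grouping for length '{length}'")
--
-- def make_ungrouped_groups(max_length: int) -> List[Tuple[int, int]]:
--     groups = []
--     starting_base = 1
--     interval = 1
--     while starting_base <= max_length:
--         end_base = starting_base + interval - 1
--         if end_base > max_length:
--             end_base = max_length
--         groups.append((starting_base - 1, end_base))
--         starting_base += interval
--     return groups
--
-- def make_linear_base_groups(max_length: int) -> List[Tuple[int, int]]:
--     if max_length <= 75:
--         return make_ungrouped_groups(max_length)
--
--     interval = get_linear_interval(max_length)
--     starting_base = 1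
--     groups = []
--
--     while starting_base <= max_length:
--         end_base = starting_base + interval - 1
--
--         if starting_base < 10:
--             end_base = starting_base
--
--         if starting_base == 10 and interval > 10:
--             end_base = interval - 1
--
--         if end_base > max_length:
--             end_base = max_length
--
--         groups.append((starting_base - 1, end_base))
--
--         if starting_base < 10:
--             starting_base += 1
--         elif starting_base == 10 and interval > 10:
--             starting_base = interval
--         else:
--             starting_base += interval
--     return groups
-- ===== SOURCE B (Python) =====
-- from typing import Tuple, List
--
-- def get_linear_interval(length: int) -> int:
--     """Smallest interval from the 1-2-5 ladder giving < 75 groups.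
--     group_count = 9 + ceil((length-9)/iv) < 75  <=>  length - 9 <= 65*iv."""
--     for exp in range(7):
--         for base in (2, 5, 10):
--             iv = base * 10 ** exp
--             if length - 9 <= 65 * iv:
--                 return iv
--     raise Exception(f"Couldn't find a sensible interval grouping for length '{length}'")
--
-- def make_linear_base_groups(max_length: int) -> List[Tuple[int, int]]:
--     # Build the sorted list of group boundaries (cut points) first, then pair
--     # adjacent cuts; clamping falls out of range() exclusivity + the final cut.
--     if max_length <= 75:
--         cuts = list(range(max_length + 1))
--     else:
--         interval = get_linear_interval(max_length)
--         first = interval - 1 if interval > 10 else 9 + interval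
--         cuts = list(range(10)) + list(range(first, max_length, interval)) + [max_length]
--     return list(zip(cuts, cuts[1:]))
-- ===== Notes on version B (the rewrite author's own statement) =====
-- stated objective: alternative
-- what changed: B replaces A's single while-loop with per-iteration branching by computing the sorted list of group cut points (two range() calls plus the final length) and zipping it with its own tail, and replaces get_linear_interval's floor-div/mod group counting by the closed-form test 'length - 9 <= 65 * interval' over the candidate ladder.
-- outside the precondition, e.g. on make_linear_base_groups(650000010): A raises Exception, B raises Exception
import Mathlib
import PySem

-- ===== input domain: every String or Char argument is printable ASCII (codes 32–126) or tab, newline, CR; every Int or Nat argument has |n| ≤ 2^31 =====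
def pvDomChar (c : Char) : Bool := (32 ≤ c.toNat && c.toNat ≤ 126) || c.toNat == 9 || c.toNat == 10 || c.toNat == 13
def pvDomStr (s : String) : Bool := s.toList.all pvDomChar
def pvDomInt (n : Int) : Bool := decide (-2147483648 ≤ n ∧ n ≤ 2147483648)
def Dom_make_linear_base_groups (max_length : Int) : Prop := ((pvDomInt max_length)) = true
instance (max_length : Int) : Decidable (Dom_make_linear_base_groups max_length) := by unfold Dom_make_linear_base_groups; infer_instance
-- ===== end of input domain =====

-- B re-implements get_linear_interval with the closed-form test 'length-9 <= 65*iv' over the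
-- candidate ladder, and builds the groups as the sorted list of cut points (ranges) zipped with
-- its own tail, instead of A's single branching while-loop; objective: alternative.


-- ===== PORT A =====
-- group_count < 75 test for a candidate interval (body of get_linear_interval's inner if)
def pvCond (length interval : Int) : Bool :=
  let gc := 9 + PySem.Int.floordiv (length - 9) interval
  let gc := if PySem.Int.mod (length - 9) interval != 0 then gc + 1 else gc
  gc < 75
-- get_linear_interval's while-loop: `for base in [2,5,10]` unrolled as three tests; `none` = the raise.
-- The fuel only makes the recursion structural: starting at multiplier = 1 the loop runs at most 7 times
-- (multiplier 1, 10, …, 10^6; then multiplier*10 == 10^7 raises).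
def pvGliGo (length mult : Int) : Nat → Option Int
  | 0 => none
  | f + 1 =>
    if pvCond length (2 * mult) then some (2 * mult)
    else if pvCond length (5 * mult) then some (5 * mult)
    else if pvCond length (10 * mult) then some (10 * mult)
    else if mult * 10 == 10000000 then none
    else pvGliGo length (mult * 10) f

def pvGli (length : Int) : Option Int := pvGliGo length 1 7

-- make_ungrouped_groups' while-loop (fuel bounds the ≤ max_length iterations of step 1)
def pvUngroupedGo (max_length starting_base interval : Int) : Nat → List (Int × Int)
  | 0 => []
  | f + 1 =>
    if starting_base ≤ max_length then
      (starting_base - 1,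
        if starting_base + interval - 1 > max_length then max_length
        else starting_base + interval - 1) ::
        pvUngroupedGo max_length (starting_base + interval) interval f
    else []

def make_ungrouped_groups (max_length : Int) : List (Int × Int) :=
  pvUngroupedGo max_length 1 1 (max_length.toNat + 1)

-- A's main while-loop, branch for branch
def pvMlbgGo (max_length interval starting_base : Int) : Nat → List (Int × Int)
  | 0 => []
  | f + 1 =>
    -- end_base: the later reassignments (sb < 10; sb == 10 with interval > 10) take priority,
    -- then the clamp to max_length; `next` is the matching starting_base update
    if starting_base ≤ max_length then
      (starting_base - 1,
        if (if starting_base == 10 && interval > 10 then interval - 1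
            else if starting_base < 10 then starting_base
            else starting_base + interval - 1) > max_length then max_length
        else if starting_base == 10 && interval > 10 then interval - 1
        else if starting_base < 10 then starting_base
        else starting_base + interval - 1) ::
        pvMlbgGo max_length interval
          (if starting_base < 10 then starting_base + 1
           else if starting_base == 10 && interval > 10 then interval
           else starting_base + interval) f
    else []

def make_linear_base_groups (max_length : Int) : List (Int × Int) :=
  if max_length ≤ 75 then make_ungrouped_groups max_length
  else
    match pvGli max_length with
    | none => []           -- Python raises here; these inputs are excluded by Pre_
    | some interval => pvMlbgGo max_length interval 1 (max_length.toNat + 2)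

-- ===== PORT B =====
-- B's get_linear_interval: 'for exp in range(7): for base in (2,5,10)' with the closed-form
-- test 'length - 9 <= 65 * iv'; the exponent list [0..6] is range(7), `none` = the raise.
def pvGliBGo (length : Int) : List Nat → Option Int
  | [] => none
  | e :: rest =>
    if length - 9 ≤ 65 * (2 * 10 ^ e) then some (2 * 10 ^ e)
    else if length - 9 ≤ 65 * (5 * 10 ^ e) then some (5 * 10 ^ e)
    else if length - 9 ≤ 65 * (10 * 10 ^ e) then some (10 * 10 ^ e)
    else pvGliBGo length rest

def pvGliB (length : Int) : Option Int := pvGliBGo length [0, 1, 2, 3, 4, 5, 6]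

def make_linear_base_groups_alt (max_length : Int) : List (Int × Int) :=
  if max_length ≤ 75 then
    let cuts := PySem.List.pyRange 0 (max_length + 1) 1
    cuts.zip (cuts.drop 1)
  else
    match pvGliB max_length with
    | none => []           -- Python raises here; these inputs are excluded by Pre_
    | some interval =>
      let first := if interval > 10 then interval - 1 else 9 + interval
      let cuts := PySem.List.pyRange 0 10 1 ++
        PySem.List.pyRange first max_length interval ++ [max_length]
      cuts.zip (cuts.drop 1)

-- ===== PRECONDITION & SPEC =====
-- Pre_ excludes exactly the lengths on which Python A raises ("Couldn't find a sensible interval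
-- grouping"): get_linear_interval fails for max_length > 650000009 (no candidate ≤ 10^7 works).
def Pre_make_linear_base_groups (max_length : Int) : Prop := max_length ≤ 650000009
instance (max_length : Int) : Decidable (Pre_make_linear_base_groups max_length) := by unfold Pre_make_linear_base_groups; infer_instance
def pvWitness_make_linear_base_groups : Int := 120

def Spec_make_linear_base_groups (max_length : Int) (out : List (Int × Int)) : Prop := out = make_linear_base_groups_alt max_length
instance (max_length : Int) (out : List (Int × Int)) : Decidable (Spec_make_linear_base_groups max_length out) := by unfold Spec_make_linear_base_groups; infer_instance

-- ===== CLAIM (what is proved, stated in full; the proofs are below) =====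
def Claim_equal_make_linear_base_groups : Prop := ∀ (max_length : Int), Dom_make_linear_base_groups max_length → Pre_make_linear_base_groups max_length → Spec_make_linear_base_groups max_length (make_linear_base_groups max_length)

-- ===== LEMMAS AND PROOFS =====

-- pyRange with a positive step: nil and cons forms
lemma pv_pyRange_pos_nil (a b s : Int) (hs : 0 < s) (h : b ≤ a) :
    PySem.List.pyRange a b s = [] := by
  rw [PySem.List.pyRange_of_pos a b hs, if_neg (by omega)]
  simp

lemma pv_pyRange_pos_cons (a b s : Int) (hs : 0 < s) (h : a < b) :
    PySem.List.pyRange a b s = a :: PySem.List.pyRange (a + s) b s := by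
  rw [PySem.List.pyRange_of_pos a b hs, PySem.List.pyRange_of_pos (a + s) b hs, if_pos h]
  have key : ((b - a + s - 1) / s).toNat =
      (if a + s < b then ((b - (a + s) + s - 1) / s).toNat else 0) + 1 := by
    by_cases h2 : a + s < b
    · rw [if_pos h2]
      have e : b - a + s - 1 = (b - (a + s) + s - 1) + 1 * s := by ring
      rw [e, Int.add_mul_ediv_right _ _ (by omega : s ≠ 0)]
      have hq : 0 ≤ (b - (a + s) + s - 1) / s := Int.ediv_nonneg (by omega) (by omega)
      omega
    · rw [if_neg h2]
      have h1 : (b - a + s - 1) / s = 1 :=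
        ((Int.ediv_emod_unique (a := b - a + s - 1) (b := s) (r := b - a - 1) (q := 1) hs).mpr
          ⟨by ring, by omega, by omega⟩).1
      omega
  rw [key, List.range_succ_eq_map, List.map_cons, List.map_map]
  congr 1
  · push_cast; ring
  · apply List.map_congr_left
    intro k _
    simp only [Function.comp_apply]
    push_cast
    ring

-- a list with at most one element zips with its own tail to []
lemma pv_zip_short {l : List Int} (h : l.length ≤ 1) : l.zip (l.drop 1) = [] := by
  match l, h with
  | [], _ => rfl
  | [x], _ => rfl

-- the '< 75 groups' test is equivalent to B's closed-form 'length - 9 ≤ 65 * iv'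
lemma pv_cond_iff (L iv : Int) (hiv : 0 < iv) :
    pvCond L iv = decide (L - 9 ≤ 65 * iv) := by
  unfold pvCond
  have hqr : iv * PySem.Int.floordiv (L - 9) iv + PySem.Int.mod (L - 9) iv = L - 9 := by
    simpa [PySem.Int.floordiv, PySem.Int.mod] using Int.mul_fdiv_add_fmod (L - 9) iv
  have hr0 : 0 ≤ PySem.Int.mod (L - 9) iv := by
    simpa [PySem.Int.mod] using Int.fmod_nonneg_of_pos (L - 9) hiv
  have hr1 : PySem.Int.mod (L - 9) iv < iv := by
    simpa [PySem.Int.mod] using Int.fmod_lt_of_pos (L - 9) hiv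
  set q := PySem.Int.floordiv (L - 9) iv with hq
  set r := PySem.Int.mod (L - 9) iv with hr
  by_cases hz : r = 0
  · simp only [hz, bne_self_eq_false, Bool.false_eq_true, if_false, decide_eq_decide]
    constructor
    · intro hlt
      have hq65 : q ≤ 65 := by omega
      nlinarith
    · intro hle
      by_contra hcon
      have hq66 : 66 ≤ q := by omega
      nlinarith
  · simp only [bne_iff_ne, ne_eq, hz, not_false_eq_true, if_pos, decide_eq_decide]
    have hr1' : 1 ≤ r := by omega
    constructor
    · intro hlt
      have hq64 : q ≤ 64 := by omega
      nlinarith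
    · intro hle
      by_contra hcon
      have hq65 : 65 ≤ q := by omega
      nlinarith

-- A's and B's interval searches agree (both scan the same ladder 2,5,10,20,…,10^7 in order)
lemma pv_gli_eq (L : Int) : pvGli L = pvGliB L := by
  have c : ∀ iv : Int, 0 < iv → pvCond L iv = decide (L - 9 ≤ 65 * iv) := pv_cond_iff L
  unfold pvGli pvGliB
  rw [show (7 : Nat) = 6 + 1 from rfl]
  rw [pvGliGo, pvGliGo, pvGliGo, pvGliGo, pvGliGo, pvGliGo, pvGliGo,
    pvGliBGo, pvGliBGo, pvGliBGo, pvGliBGo, pvGliBGo, pvGliBGo, pvGliBGo, pvGliBGo]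
  norm_num [pv_cond_iff]

-- any interval the search returns is ≥ 2
lemma pv_gli_ge (len : Int) : ∀ (f : Nat) (mult i : Int), 1 ≤ mult →
    pvGliGo len mult f = some i → 2 ≤ i := by
  intro f
  induction f with
  | zero => intro mult i _ h; simp [pvGliGo] at h
  | succ f ih =>
    intro mult i hm h
    rw [pvGliGo] at h
    split_ifs at h with h1 h2 h3 h4
    · injection h with h; omega
    · injection h with h; omega
    · injection h with h; omega
    · exact ih (mult * 10) i (by omega) h

-- the ungrouped loop is the zip of the cut list 0,1,…,max_length with its tail
lemma pv_ungrouped_zip (L : Int) : ∀ (f : Nat) (sb : Int), 1 ≤ sb → L + 1 - sb ≤ (f : Int) →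
    pvUngroupedGo L sb 1 f =
      (PySem.List.pyRange (sb - 1) (L + 1) 1).zip ((PySem.List.pyRange (sb - 1) (L + 1) 1).drop 1) := by
  intro f
  induction f with
  | zero =>
    intro sb h1 hfuel
    rw [pvUngroupedGo, pv_zip_short]
    rw [PySem.List.length_pyRange_one]
    omega
  | succ f ih =>
    intro sb h1 hfuel
    by_cases hsb : sb ≤ L
    · rw [pvUngroupedGo, if_pos hsb, if_neg (by omega : ¬ sb + 1 - 1 > L),
        ih (sb + 1) (by omega) (by push_cast at hfuel ⊢; omega),
        show sb + 1 - 1 = sb from by omega,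
        PySem.List.pyRange_one_cons (by omega : sb - 1 < L + 1),
        show sb - 1 + 1 = sb from by omega,
        PySem.List.pyRange_one_cons (by omega : sb < L + 1)]
      simp only [List.drop_one, List.tail_cons, List.zip_cons_cons]
    · rw [pvUngroupedGo, if_neg hsb, pv_zip_short]
      rw [PySem.List.length_pyRange_one]
      omega

-- peeling one of the nine leading singleton groups off A's loop
lemma pv_peelA (L int : Int) (hL : 75 < L) (f : Nat) (sb : Int)
    (h1 : 1 ≤ sb) (h9 : sb ≤ 9) :
    pvMlbgGo L int sb (f + 1) = (sb - 1, sb) :: pvMlbgGo L int (sb + 1) f := by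
  have hbeq : (sb == 10 && decide (int > 10)) = false := by
    simp [beq_eq_false_iff_ne.mpr (by omega : sb ≠ 10)]
  rw [pvMlbgGo, if_pos (by omega : sb ≤ L)]
  simp only [hbeq, Bool.false_eq_true, if_false, if_pos (by omega : sb < 10),
    if_neg (by omega : ¬ sb > L)]

-- the transition step at starting_base = 10 when interval > 10
lemma pv_step10 (L int : Int) (hL : 75 < L) (h10 : int > 10) (f : Nat) :
    pvMlbgGo L int 10 (f + 1) =
      ((9 : Int), if int - 1 > L then L else int - 1) :: pvMlbgGo L int int f := by
  have hbeq : ((10 : Int) == 10 && decide (int > 10)) = true := by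
    simp [h10]
  rw [pvMlbgGo, if_pos (by omega : (10:Int) ≤ L)]
  simp only [hbeq, if_true]
  norm_num

-- the uniform tail of A's loop is the zip of the remaining cut list with its own tail
lemma pv_tail_zip (L int : Int) (hint : 2 ≤ int) : ∀ (f : Nat) (sb : Int),
    L + 1 - sb ≤ (f : Int) → (11 ≤ sb ∨ (sb = 10 ∧ int ≤ 10)) →
    pvMlbgGo L int sb f =
      (PySem.List.pyRange (sb - 1) L int ++ [L]).zip
        ((PySem.List.pyRange (sb - 1) L int ++ [L]).drop 1) := by
  intro f
  induction f with
  | zero =>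
    intro sb hfuel hside
    rw [pvMlbgGo, pv_zip_short]
    rw [pv_pyRange_pos_nil (sb - 1) L int (by omega) (by omega)]
    simp
  | succ f ih =>
    intro sb hfuel hside
    by_cases hsb : sb ≤ L
    · have hbeq : (sb == 10 && decide (int > 10)) = false := by
        rcases hside with h | ⟨he, hle⟩
        · simp [beq_eq_false_iff_ne.mpr (by omega : sb ≠ 10)]
        · simp [he, decide_eq_false (by omega : ¬ int > 10)]
      rw [pvMlbgGo, if_pos hsb]
      simp only [hbeq, Bool.false_eq_true, if_false,
        if_neg (show ¬ sb < 10 by rcases hside with h | ⟨he, _⟩ <;> omega)]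
      rw [ih (sb + int) (by push_cast at hfuel ⊢; omega) (by omega),
        show sb + int - 1 = sb - 1 + int from by ring,
        pv_pyRange_pos_cons (sb - 1) L int (by omega) (by omega : sb - 1 < L)]
      by_cases hc : sb - 1 + int < L
      · rw [if_neg (by omega : ¬ sb - 1 + int > L),
          pv_pyRange_pos_cons (sb - 1 + int) L int (by omega) hc]
        simp only [List.cons_append, List.drop_one, List.tail_cons, List.zip_cons_cons]
      · rw [show (if sb - 1 + int > L then L else sb - 1 + int) = L from by split_ifs <;> omega,
          pv_pyRange_pos_nil (sb - 1 + int) L int (by omega) (by omega)]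
        simp only [List.nil_append, List.cons_append, List.drop_one, List.tail_cons,
          List.zip_cons_cons, List.zip_nil_right]

    · rw [pvMlbgGo, if_neg hsb, pv_zip_short]
      rw [pv_pyRange_pos_nil (sb - 1) L int (by omega) (by omega)]
      simp

-- the grouped case: A's whole loop equals B's zipped cut list
lemma pv_grouped_zip (L int : Int) (hL : 75 < L) (hint : 2 ≤ int) :
    pvMlbgGo L int 1 (L.toNat + 2) =
      ((PySem.List.pyRange 0 10 1 ++
          PySem.List.pyRange (if int > 10 then int - 1 else 9 + int) L int ++ [L]).zip
        ((PySem.List.pyRange 0 10 1 ++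
          PySem.List.pyRange (if int > 10 then int - 1 else 9 + int) L int ++ [L]).drop 1)) := by
  obtain ⟨f, hf⟩ : ∃ f, L.toNat + 2 = f + 10 := ⟨L.toNat - 8, by omega⟩
  have hrange10 : PySem.List.pyRange 0 10 1 = [0, 1, 2, 3, 4, 5, 6, 7, 8, 9] := by decide
  have hpeel : pvMlbgGo L int 1 (f + 10) =
      [((0:Int),(1:Int)),(1,2),(2,3),(3,4),(4,5),(5,6),(6,7),(7,8),(8,9)] ++
        pvMlbgGo L int 10 (f + 1) := by
    rw [show f + 10 = f + 9 + 1 from rfl, pv_peelA L int hL _ 1 (by omega) (by omega),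
      show (1:Int) + 1 = 2 from by norm_num]
    rw [show f + 9 = f + 8 + 1 from rfl, pv_peelA L int hL _ 2 (by omega) (by omega),
      show (2:Int) + 1 = 3 from by norm_num]
    rw [show f + 8 = f + 7 + 1 from rfl, pv_peelA L int hL _ 3 (by omega) (by omega),
      show (3:Int) + 1 = 4 from by norm_num]
    rw [show f + 7 = f + 6 + 1 from rfl, pv_peelA L int hL _ 4 (by omega) (by omega),
      show (4:Int) + 1 = 5 from by norm_num]
    rw [show f + 6 = f + 5 + 1 from rfl, pv_peelA L int hL _ 5 (by omega) (by omega),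
      show (5:Int) + 1 = 6 from by norm_num]
    rw [show f + 5 = f + 4 + 1 from rfl, pv_peelA L int hL _ 6 (by omega) (by omega),
      show (6:Int) + 1 = 7 from by norm_num]
    rw [show f + 4 = f + 3 + 1 from rfl, pv_peelA L int hL _ 7 (by omega) (by omega),
      show (7:Int) + 1 = 8 from by norm_num]
    rw [show f + 3 = f + 2 + 1 from rfl, pv_peelA L int hL _ 8 (by omega) (by omega),
      show (8:Int) + 1 = 9 from by norm_num]
    rw [show f + 2 = f + 1 + 1 from rfl, pv_peelA L int hL _ 9 (by omega) (by omega),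
      show (9:Int) + 1 = 10 from by norm_num]
    norm_num
  rw [hf, hpeel, hrange10]
  by_cases h10 : int > 10
  · rw [if_pos h10, pv_step10 L int hL h10 f,
      pv_tail_zip L int hint f int (by have := hf; omega) (by omega)]
    by_cases hc : int - 1 < L
    · rw [if_neg (by omega : ¬ int - 1 > L),
        pv_pyRange_pos_cons (int - 1) L int (by omega) hc]
      simp only [List.cons_append, List.nil_append, List.drop_one, List.tail_cons,
        List.zip_cons_cons]
    · rw [show (if int - 1 > L then L else int - 1) = L from by split_ifs <;> omega,
        pv_pyRange_pos_nil (int - 1) L int (by omega) (by omega)]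
      simp only [List.cons_append, List.nil_append, List.drop_one, List.tail_cons,
        List.zip_cons_cons, List.zip_nil_right]
  · rw [if_neg h10,
      pv_tail_zip L int hint (f + 1) 10 (by have := hf; push_cast; omega) (by omega),
      show (10:Int) - 1 = 9 from by norm_num,
      pv_pyRange_pos_cons 9 L int (by omega) (by omega : (9:Int) < L)]
    simp only [List.cons_append, List.nil_append, List.drop_one, List.tail_cons,
      List.zip_cons_cons]

-- ===== VERDICT (by name: the statement is the Claim_ definition above) =====
theorem make_linear_base_groups_spec : Claim_equal_make_linear_base_groups := by
  intro L hdom hpre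
  unfold Spec_make_linear_base_groups make_linear_base_groups make_linear_base_groups_alt
  by_cases hL : L ≤ 75
  · rw [if_pos hL, if_pos hL, make_ungrouped_groups,
      pv_ungrouped_zip L (L.toNat + 1) 1 (by omega) (by push_cast; omega)]
    norm_num
  · rw [if_neg hL, if_neg hL, ← pv_gli_eq]
    cases hg : pvGli L with
    | none => rfl
    | some int =>
      have hint : 2 ≤ int := pv_gli_ge L 7 1 int (by omega) hg
      simpa using pv_grouped_zip L int (by omega) hint
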